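-- pv_equiv track=rewrite | github.com/VeeraSaiJoshik/AllStateJarvis | TUI/solutions/math_nt/gcd_lcm.py | count_pairs_gcd_k
-- ===== SOURCE A (Python) =====
-- def count_pairs_gcd_k(arr, k):
--     """Count pairs (i,j) where gcd(arr[i], arr[j]) == k."""
--     from collections import Counter
--     count = Counter(x for x in arr if x % k == 0)
--     # Normalize by dividing by k
--     normalized = Counter(x // k for x in arr if x % k == 0)
--     # Use inclusion-exclusion with Euler's totient / Mobius
--     # For simple version: iterate over multiples
--     freq = [0] * (max(normalized) + 2) if normalized else [0]
--     for v, c in normalized.items():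
--         freq[v] = c
--     result_at_least = [0] * len(freq)
--     for d in range(1, len(freq)):
--         for mult in range(d, len(freq), d):
--             result_at_least[d] += freq[mult]
--     # pairs with gcd divisible by d*k: C(result_at_least[d], 2)
--     # Use Mobius inversion for exact count
--     pairs_ge = [x * (x - 1) // 2 for x in result_at_least]
--     exact = [0] * len(freq)
--     for d in range(len(freq) - 1, 0, -1):
--         exact[d] = pairs_ge[d]
--         for mult in range(2 * d, len(freq), d):
--             exact[d] -= exact[mult]
--     return exact[1] if len(exact) > 1 else 0
-- ===== SOURCE B (Python) =====
-- def count_pairs_gcd_k(arr, k):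
--     """Count pairs (i,j) where gcd(arr[i], arr[j]) == k."""
--     def _gcd(a, b):
--         return a if b == 0 else _gcd(b, a % b)
--     vals = [x // k for x in arr if x % k == 0]
--     total = 0
--     for i in range(len(vals)):
--         for j in range(i + 1, len(vals)):
--             if _gcd(vals[i], vals[j]) == 1:
--                 total += 1
--     return total
-- ===== Notes on version B (the rewrite author's own statement) =====
-- stated objective: simpler
-- what changed: Replaced A's divisor-sieve over [1, max/k] with Mobius-style backward inclusion-exclusion by a direct pairwise scan: keep the multiples of k, divide by k, and count the pairs whose (Euclid) gcd is 1.
-- outside the precondition, e.g. on count_pairs_gcd_k([-6, 3], 3): A returns 0, B returns 1; on count_pairs_gcd_k([0, 3], 3): A returns 0, B returns 1; on count_pairs_gcd_k([5, 10], -5): A raises IndexError, B returns 0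
import Mathlib
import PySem

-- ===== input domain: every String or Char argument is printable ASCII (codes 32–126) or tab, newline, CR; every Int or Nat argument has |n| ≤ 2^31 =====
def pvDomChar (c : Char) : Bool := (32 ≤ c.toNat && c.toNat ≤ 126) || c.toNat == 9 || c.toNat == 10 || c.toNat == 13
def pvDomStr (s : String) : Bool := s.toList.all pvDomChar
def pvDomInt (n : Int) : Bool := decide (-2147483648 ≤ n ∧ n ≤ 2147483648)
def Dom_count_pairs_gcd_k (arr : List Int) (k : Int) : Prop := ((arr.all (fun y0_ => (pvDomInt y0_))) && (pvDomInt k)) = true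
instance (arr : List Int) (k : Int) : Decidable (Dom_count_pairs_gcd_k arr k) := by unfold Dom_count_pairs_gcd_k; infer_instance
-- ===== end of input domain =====

-- B replaces A's divisor-sieve plus backward inclusion-exclusion over [1, max/k] by a direct
-- pairwise scan counting coprime normalized pairs: simpler, not claimed faster.

-- ===== PORT A =====
-- Python's int lists freq / result_at_least / exact are modelled as total maps (Int → Int),
-- read and written at exactly the indices A's loops touch, with the shared length
-- L = len(freq) carried explicitly; every loop, branch and update follows A's code line by line.
-- The variable `count = Counter(...)` in A is dead (never read) and is omitted.
def count_pairs_gcd_k (arr : List Int) (k : Int) : Int :=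
  let normalized := PySem.Dict.counter
    ((arr.filter (fun x => PySem.Int.mod x k == 0)).map (fun x => PySem.Int.floordiv x k))
  let L : Int := if normalized.keys ≠ [] then (PySem.List.max? normalized.keys (fun v => v)).getD 0 + 2 else 1
  let freq : Int → Int :=
    normalized.items.foldl (fun f vc => fun i => if i = vc.1 then vc.2 else f i) (fun _ => 0)
  let ral : Int → Int :=
    (PySem.List.pyRange 1 L 1).foldl
      (fun r d => (PySem.List.pyRange d L d).foldl
        (fun r' m => fun i => if i = d then r' d + freq m else r' i) r)
      (fun _ => 0)
  let pairs_ge : Int → Int := fun i => PySem.Int.floordiv (ral i * (ral i - 1)) 2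
  let exact : Int → Int :=
    (PySem.List.pyRange (L - 1) 0 (-1)).foldl
      (fun e d =>
        let e1 : Int → Int := fun i => if i = d then pairs_ge d else e i
        (PySem.List.pyRange (2 * d) L d).foldl
          (fun e' m => fun i => if i = d then e' d - e' m else e' i) e1)
      (fun _ => 0)
  if L > 1 then exact 1 else 0

-- ===== PORT B =====
-- Python's `a % b` keeps the divisor's sign, hence PySem.Int.mod; the lemma below is the
-- termination measure of the recursive Euclid helper _gcd (|a % b| < |b| for b ≠ 0).
theorem pymod_natAbs_lt (a : Int) {b : Int} (hb : b ≠ 0) :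
    (PySem.Int.mod a b).natAbs < b.natAbs := by
  rcases lt_or_gt_of_ne hb with h | h
  · have := PySem.Int.mod_neg_bounds a h
    omega
  · have h1 := PySem.Int.mod_nonneg a h
    have h2 := PySem.Int.mod_lt a h
    omega

def pygcd (a b : Int) : Int :=
  if hb : b = 0 then a else pygcd b (PySem.Int.mod a b)
termination_by b.natAbs
decreasing_by exact pymod_natAbs_lt a hb

def altGo (total : Int) : List Int → Int
  | [] => total
  | x :: rest =>
      altGo (rest.foldl (fun t y => if pygcd x y == 1 then t + 1 else t) total) rest

def count_pairs_gcd_k_alt (arr : List Int) (k : Int) : Int :=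
  let vals := (arr.filter (fun x => PySem.Int.mod x k == 0)).map (fun x => PySem.Int.floordiv x k)
  altGo 0 vals

-- ===== PRECONDITION & SPEC =====
-- Pre_ requires k ≠ 0 (A raises ZeroDivisionError on k = 0) and that every element divisible
-- by k has positive quotient x // k: when some quotient is nonpositive A either raises
-- IndexError or returns values shaped by negative list-index wraparound and by silently
-- dropping the zero quotients, an artefact of its freq-array indexing (on parts of that
-- region the two values still coincide; the whole artefact region is excluded).
def Pre_count_pairs_gcd_k (arr : List Int) (k : Int) : Prop :=
  k ≠ 0 ∧ ∀ x ∈ arr, PySem.Int.mod x k = 0 → 1 ≤ PySem.Int.floordiv x k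
instance (arr : List Int) (k : Int) : Decidable (Pre_count_pairs_gcd_k arr k) := by
  unfold Pre_count_pairs_gcd_k; infer_instance

def pvWitness_count_pairs_gcd_k : List Int × Int := ([6, 4, 9, 2], 2)

def Spec_count_pairs_gcd_k (arr : List Int) (k : Int) (out : Int) : Prop := out = count_pairs_gcd_k_alt arr k
instance (arr : List Int) (k : Int) (out : Int) : Decidable (Spec_count_pairs_gcd_k arr k out) := by unfold Spec_count_pairs_gcd_k; infer_instance

-- ===== CLAIM (what is proved, stated in full; the proofs are below) =====
def Claim_equal_count_pairs_gcd_k : Prop := ∀ (arr : List Int) (k : Int), Dom_count_pairs_gcd_k arr k → Pre_count_pairs_gcd_k arr k → Spec_count_pairs_gcd_k arr k (count_pairs_gcd_k arr k)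

-- ===== LEMMAS AND PROOFS =====

theorem countP_or_disj (p q : Int → Bool) (l : List Int)
    (h : ∀ a, ¬(p a = true ∧ q a = true)) :
    l.countP (fun a => p a || q a) = l.countP p + l.countP q := by
  induction l with
  | nil => simp
  | cons x xs ih =>
    have := h x
    simp only [List.countP_cons]
    cases hp : p x <;> cases hq : q x <;> simp_all <;> omega

def pairsP (p : Int → Int → Bool) : List Int → Nat
  | [] => 0
  | x :: r => r.countP (p x) + pairsP p r

theorem pairsP_congr {p q : Int → Int → Bool} {V : List Int}
    (h : ∀ x ∈ V, ∀ y ∈ V, p x y = q x y) : pairsP p V = pairsP q V := by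
  induction V with
  | nil => rfl
  | cons x r ih =>
    simp only [pairsP]
    rw [List.countP_congr (fun y hy => by rw [h x (by simp) y (List.mem_cons_of_mem _ hy)]),
        ih (fun a ha b hb => h a (List.mem_cons_of_mem _ ha) b (List.mem_cons_of_mem _ hb))]

theorem pairsP_or_disj (p q : Int → Int → Bool) (V : List Int)
    (h : ∀ x y, ¬(p x y = true ∧ q x y = true)) :
    pairsP (fun x y => p x y || q x y) V = pairsP p V + pairsP q V := by
  induction V with
  | nil => rfl
  | cons x r ih =>
    simp only [pairsP, countP_or_disj (p x) (q x) r (h x), ih]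
    omega

theorem pairsP_count (p : Int → Bool) (V : List Int) :
    (V.countP p : Int) * ((V.countP p : Int) - 1) = 2 * (pairsP (fun x y => p x && p y) V : Int) := by
  induction V with
  | nil => simp [pairsP]
  | cons x r ih =>
    simp only [pairsP, List.countP_cons]
    cases hp : p x
    · have hc : List.countP (fun y => false && p y) r = 0 := by simp
      rw [hc]
      simp only [Bool.false_eq_true, if_false, Nat.add_zero, Nat.zero_add]
      linear_combination ih
    · have hc : List.countP (fun y => true && p y) r = List.countP p r := by simp
      rw [hc]
      simp only [if_pos rfl]
      push_cast
      linear_combination ih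

theorem pairsP_false (V : List Int) : pairsP (fun _ _ => false) V = 0 := by
  induction V with
  | nil => rfl
  | cons x r ih => simp [pairsP, ih]

theorem pairsP_split (f : Int → Int → Int) (ms : List Int) (hnd : ms.Nodup) (V : List Int) :
    (pairsP (fun x y => decide (f x y ∈ ms)) V : Int)
      = ((ms.map (fun m => (pairsP (fun x y => f x y == m) V : Int))).sum) := by
  induction ms with
  | nil =>
    have h : pairsP (fun x y => decide (f x y ∈ ([] : List Int))) V = pairsP (fun _ _ => false) V :=
      pairsP_congr (by simp)
    simp [h, pairsP_false]
  | cons m t ih =>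
    have hmt : m ∉ t := (List.nodup_cons.mp hnd).1
    have h1 : pairsP (fun x y => decide (f x y ∈ m :: t)) V
        = pairsP (fun x y => (f x y == m) || decide (f x y ∈ t)) V := by
      apply pairsP_congr
      intro x _ y _
      by_cases h : f x y = m <;> simp [h]
    have h2 := pairsP_or_disj (fun x y => f x y == m) (fun x y => decide (f x y ∈ t)) V
      (by intro x y ⟨h1', h2'⟩
          exact hmt (by simpa [beq_iff_eq.mp h1'] using of_decide_eq_true h2'))
    rw [h1, h2, List.map_cons, List.sum_cons, ← ih (List.nodup_cons.mp hnd).2]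
    push_cast
    ring

theorem count_sum (ms : List Int) (hnd : ms.Nodup) (V : List Int) :
    ((ms.map (fun m => (V.count m : Int))).sum) = (V.countP (fun v => decide (v ∈ ms)) : Int) := by
  induction ms with
  | nil => simp
  | cons m t ih =>
    have hmt : m ∉ t := (List.nodup_cons.mp hnd).1
    have h1 : V.countP (fun v => decide (v ∈ m :: t))
        = V.countP (fun v => (v == m) || decide (v ∈ t)) := by
      apply List.countP_congr; intro v _
      by_cases h : v = m <;> simp [h]
    have h2 := countP_or_disj (fun v => v == m) (fun v => decide (v ∈ t)) V
      (by intro v ⟨h1', h2'⟩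
          exact hmt (by simpa [beq_iff_eq.mp h1'] using of_decide_eq_true h2'))
    rw [h1, h2, List.map_cons, List.sum_cons]
    push_cast
    rw [← ih (List.nodup_cons.mp hnd).2]
    have hcm : V.countP (fun v => v == m) = V.count m := rfl
    rw [hcm]

theorem pygcd_eq (b a : Int) (ha : 0 ≤ a) (hb : 0 ≤ b) : pygcd a b = (Int.gcd a b : Int) := by
  induction hn : b.natAbs using Nat.strong_induction_on generalizing a b with
  | _ n ih =>
    by_cases h0 : b = 0
    · subst h0
      rw [pygcd]
      simp [Int.gcd, Int.natAbs_of_nonneg ha]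
    · have hbpos : 0 < b := lt_of_le_of_ne hb (Ne.symm h0)
      have hr : PySem.Int.mod a b = a % b := PySem.Int.mod_eq_emod_of_pos hbpos
      rw [pygcd, dif_neg h0, hr]
      have hrec := ih ((a % b).natAbs) (by rw [← hn, ← hr]; exact pymod_natAbs_lt a h0)
        (a % b) b hb (Int.emod_nonneg a h0) rfl
      rw [hrec]
      congr 1
      rw [Int.gcd_comm b (a % b)]
      exact Int.gcd_emod a b

theorem altGo_eq (V : List Int) : ∀ (t : Int),
    altGo t V = t + (pairsP (fun x y => pygcd x y == 1) V : Int) := by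
  induction V with
  | nil => intro t; simp [altGo, pairsP]
  | cons x r ih =>
    intro t
    rw [altGo, PySem.List.foldl_if_add_one (fun y => pygcd x y == 1) r t, ih]
    simp [pairsP]
    ring


theorem ral_inner_sum (freq : Int → Int) (d : Int) :
    ∀ (ms : List Int) (r : Int → Int),
    ms.foldl (fun r' m => fun i => if i = d then r' d + freq m else r' i) r
      = fun i => if i = d then r d + (ms.map freq).sum else r i := by
  intro ms
  induction ms with
  | nil => intro r; funext i; by_cases h : i = d <;> simp [h]
  | cons m t ih =>
    intro r
    rw [List.foldl_cons, ih]
    funext i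
    by_cases h : i = d <;> simp [h]
    ring

theorem inner_sub (d : Int) :
    ∀ (ms : List Int), (∀ m ∈ ms, m ≠ d) → ∀ (r : Int → Int),
    ms.foldl (fun e' m => fun i => if i = d then e' d - e' m else e' i) r
      = fun i => if i = d then r d - (ms.map r).sum else r i := by
  intro ms
  induction ms with
  | nil => intro _ r; funext i; by_cases h : i = d <;> simp [h]
  | cons m t ih =>
    intro hne r
    have hmd : m ≠ d := hne m (by simp)
    rw [List.foldl_cons, ih (fun a ha => hne a (List.mem_cons_of_mem _ ha))]
    funext i
    by_cases h : i = d
    · have hmap : t.map (fun j => if j = d then r d - r m else r j) = t.map r := by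
        apply List.map_congr_left
        intro a ha
        rw [if_neg (hne a (List.mem_cons_of_mem _ ha))]
      simp [h, hmap, if_neg hmd]
      ring
    · simp [h]

theorem upd_fold (g : Int → Int → Int) :
    ∀ (ds : List Int), ds.Nodup → ∀ (f0 : Int → Int),
    ds.foldl (fun f d => fun i => if i = d then g d (f d) else f i) f0
      = fun i => if i ∈ ds then g i (f0 i) else f0 i := by
  intro ds
  induction ds with
  | nil => intro _ f0; funext i; simp
  | cons d t ih =>
    intro hnd f0
    have hdt : d ∉ t := (List.nodup_cons.mp hnd).1
    rw [List.foldl_cons, ih (List.nodup_cons.mp hnd).2]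
    funext i
    by_cases hit : i ∈ t
    · have hid : i ≠ d := fun h => hdt (h ▸ hit)
      simp [hit, hid, List.mem_cons]
    · by_cases hid : i = d
      · subst hid
        simp [hdt]
      · simp [hit, hid, List.mem_cons]

theorem pyRange_pos_cons {a b s : Int} (hs : 0 < s) (hab : a < b) :
    PySem.List.pyRange a b s = a :: PySem.List.pyRange (a + s) b s := by
  rw [PySem.List.pyRange_of_pos a b hs, PySem.List.pyRange_of_pos (a + s) b hs]
  have hn : ((b - a + s - 1) / s).toNat = ((b - (a + s) + s - 1) / s).toNat + 1 := by
    have h1 : (b - a + s - 1) / s = (b - (a + s) + s - 1) / s + 1 := by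
      have : b - a + s - 1 = (b - (a + s) + s - 1) + 1 * s := by ring
      rw [this, Int.add_mul_ediv_right _ _ (ne_of_gt hs)]
    have h2 : 0 ≤ (b - (a + s) + s - 1) / s := by
      apply Int.ediv_nonneg _ (le_of_lt hs)
      omega
    omega
  rw [if_pos hab, hn]
  by_cases h2 : a + s < b
  · rw [if_pos h2, List.range_succ_eq_map, List.map_cons, List.map_map]
    congr 1
    · simp
    · apply List.map_congr_left
      intro x _
      simp [Function.comp]
      push_cast
      ring
  · rw [if_neg h2]
    have hz : (b - (a + s) + s - 1) / s = 0 := Int.ediv_eq_zero_of_lt (by omega) (by omega)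
    rw [hz]
    simp

theorem nodup_pyRange_pos {a b s : Int} (hs : 0 < s) : (PySem.List.pyRange a b s).Nodup := by
  rw [PySem.List.pyRange_of_pos a b hs]
  apply List.Nodup.map
  · intro x y hxy
    have hxy' : a + s * (x : Int) = a + s * (y : Int) := hxy
    have h1 : s * (x : Int) = s * (y : Int) := by omega
    have h2 := mul_left_cancel₀ (ne_of_gt hs) h1
    exact_mod_cast h2
  · exact List.nodup_range

theorem back_loop (L : Int) (pg P : Int → Int)
    (hkey : ∀ d, 1 ≤ d → d < L → pg d = P d + ((PySem.List.pyRange (2 * d) L d).map P).sum) :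
    ∀ (n : ℕ) (a : Int), a.toNat = n → a < L → ∀ (e0 : Int → Int),
      (∀ m, a < m → m < L → e0 m = P m) →
      ∀ i, 1 ≤ i → i < L →
      ((PySem.List.pyRange a 0 (-1)).foldl
        (fun e d =>
          (PySem.List.pyRange (2 * d) L d).foldl
            (fun e' m => fun i => if i = d then e' d - e' m else e' i)
            (fun i => if i = d then pg d else e i))
        e0) i = P i := by
  intro n
  induction n with
  | zero =>
    intro a ha haL e0 he0 i hi1 hiL
    rw [PySem.List.pyRange_neg_one_eq_nil (by omega)]
    exact he0 i (by omega) hiL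
  | succ n ih =>
    intro a ha haL e0 he0 i hi1 hiL
    have ha1 : 1 ≤ a := by omega
    rw [PySem.List.pyRange_neg_one_cons (by omega : (0:Int) < a), List.foldl_cons]
    -- simplify the first step
    have hne : ∀ m ∈ PySem.List.pyRange (2 * a) L a, m ≠ a := by
      intro m hm
      have := (PySem.List.mem_pyRange_iff_of_pos (by omega : (0:Int) < a) m).mp hm
      omega
    set e1 : Int → Int := fun i => if i = a then pg a else e0 i with he1
    have hstep := inner_sub a (PySem.List.pyRange (2 * a) L a) hne e1
    have hmap : (PySem.List.pyRange (2 * a) L a).map e1 = (PySem.List.pyRange (2 * a) L a).map P := by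
      apply List.map_congr_left
      intro m hm
      have hb := (PySem.List.mem_pyRange_iff_of_pos (by omega : (0:Int) < a) m).mp hm
      rw [he1]
      simp only [if_neg (hne m hm)]
      exact he0 m (by omega) (by omega)
    rw [hmap] at hstep
    have he1a : e1 a = pg a := by rw [he1]; simp
    refine ih (a - 1) (by omega) (by omega) _ ?_ i hi1 hiL
    intro m hm1 hm2
    show ((PySem.List.pyRange (2 * a) L a).foldl
          (fun e' m => fun i => if i = a then e' a - e' m else e' i) e1) m = P m
    simp only [hstep]
    by_cases hma : m = a
    · rw [hma, if_pos rfl, he1a, hkey a ha1 (by omega)]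
      ring
    · rw [if_neg hma, he1]
      simp only [if_neg hma]
      exact he0 m (by omega) hm2

theorem foldl_update_pairs (g : Int → Int) :
    ∀ (ks : List Int), ks.Nodup → ∀ (f0 : Int → Int),
    (ks.map (fun k => (k, g k))).foldl (fun f vc => fun i => if i = vc.1 then vc.2 else f i) f0
      = fun i => if i ∈ ks then g i else f0 i := by
  intro ks
  induction ks with
  | nil => intro _ f0; funext i; simp
  | cons d t ih =>
    intro hnd f0
    have hdt : d ∉ t := (List.nodup_cons.mp hnd).1
    rw [List.map_cons, List.foldl_cons, ih (List.nodup_cons.mp hnd).2]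
    funext i
    by_cases hit : i ∈ t
    · have hid : i ≠ d := fun h => hdt (h ▸ hit)
      simp [hit, hid, List.mem_cons]
    · by_cases hid : i = d
      · subst hid
        simp [hdt]
      · simp [hit, hid, List.mem_cons]

theorem freq_eq (V : List Int) :
    (PySem.Dict.counter V).items.foldl (fun f vc => fun i => if i = vc.1 then vc.2 else f i) (fun _ => 0)
      = fun i => (V.count i : Int) := by
  rw [PySem.Dict.items_counter, foldl_update_pairs _ _ (PySem.Set.nodup_ofList V)]
  funext i
  by_cases h : i ∈ PySem.Set.ofList V
  · simp [h]
  · rw [if_neg h]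
    have hnm : i ∉ V := fun hm => h ((PySem.Set.mem_ofList V i).mpr hm)
    simp [List.count_eq_zero.mpr hnm]

def Sfun (V : List Int) (L d : Int) : Int :=
  ((PySem.List.pyRange d L d).map (fun i => (V.count i : Int))).sum

def PInt (V : List Int) (m : Int) : Int :=
  (pairsP (fun x y => ((Int.gcd x y : Int)) == m) V : Int)

theorem key_identity (V : List Int) (hpos : ∀ v ∈ V, 1 ≤ v) (L : Int)
    (hbound : ∀ v ∈ V, v < L - 1) (d : Int) (hd : 1 ≤ d) (hdL : d < L) :
    PySem.Int.floordiv (Sfun V L d * (Sfun V L d - 1)) 2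
      = PInt V d + ((PySem.List.pyRange (2 * d) L d).map (PInt V)).sum := by
  have hd0 : (0:Int) < d := by omega
  have hSd : Sfun V L d = (V.countP (fun v => PySem.Int.mod v d == 0) : Int) := by
    unfold Sfun
    rw [count_sum _ (nodup_pyRange_pos hd0) V]
    congr 1
    apply List.countP_congr
    intro v hv
    have h1 := hpos v hv
    have h2 := hbound v hv
    simp only [decide_eq_true_eq, PySem.List.mem_pyRange_iff_of_pos hd0, beq_iff_eq,
      PySem.Int.mod_eq_zero_iff_dvd]
    constructor
    · rintro ⟨_, _, hdvd⟩
      simpa using dvd_add hdvd (dvd_refl d)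
    · intro hdvd
      exact ⟨Int.le_of_dvd (by omega) hdvd, by omega, dvd_sub hdvd (dvd_refl d)⟩
  rw [hSd, pairsP_count (fun v => PySem.Int.mod v d == 0) V,
    PySem.Int.floordiv_eq_ediv_of_pos (by norm_num : (0:Int) < 2),
    Int.mul_ediv_cancel_left _ (by norm_num : (2:Int) ≠ 0)]
  have hsplit : (pairsP (fun x y => PySem.Int.mod x d == 0 && PySem.Int.mod y d == 0) V : Int)
      = (pairsP (fun x y => decide ((Int.gcd x y : Int) ∈ PySem.List.pyRange d L d)) V : Int) := by
    congr 1
    apply pairsP_congr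
    intro x hx y hy
    have hx1 := hpos x hx
    have hxL := hbound x hx
    have hgpos : 0 < (Int.gcd x y : Int) := by
      have hx0 : x ≠ 0 := by omega
      have : 0 < Int.gcd x y := Int.gcd_pos_iff.mpr (Or.inl hx0)
      exact_mod_cast this
    have hgx : ((Int.gcd x y : Int)) ∣ x := Int.gcd_dvd_left x y
    have hgle : (Int.gcd x y : Int) ≤ x := Int.le_of_dvd (by omega) hgx
    by_cases hcase : d ∣ x ∧ d ∣ y
    · have hdg : d ∣ (Int.gcd x y : Int) := Int.dvd_coe_gcd hcase.1 hcase.2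
      have hmem : (Int.gcd x y : Int) ∈ PySem.List.pyRange d L d := by
        rw [PySem.List.mem_pyRange_iff_of_pos hd0]
        exact ⟨Int.le_of_dvd hgpos hdg, by omega, dvd_sub hdg (dvd_refl d)⟩
      simp [PySem.Int.mod_eq_zero_iff_dvd, hcase.1, hcase.2, hmem]
    · have hnm : (Int.gcd x y : Int) ∉ PySem.List.pyRange d L d := by
        intro hmem
        rw [PySem.List.mem_pyRange_iff_of_pos hd0] at hmem
        have hdg : d ∣ (Int.gcd x y : Int) := by
          simpa using dvd_add hmem.2.2 (dvd_refl d)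
        exact hcase ⟨hdg.trans (Int.gcd_dvd_left x y), hdg.trans (Int.gcd_dvd_right x y)⟩
      by_cases h1 : d ∣ x <;> by_cases h2 : d ∣ y <;> simp_all
  rw [hsplit, pairsP_split _ _ (nodup_pyRange_pos hd0) V, pyRange_pos_cons hd0 hdL,
    List.map_cons, List.sum_cons]
  have h2d : d + d = 2 * d := by ring
  rw [h2d]
  rfl

def ABody (V : List Int) (L : Int) : Int :=
  let freq : Int → Int :=
    (PySem.Dict.counter V).items.foldl (fun f vc => fun i => if i = vc.1 then vc.2 else f i) (fun _ => 0)
  let ral : Int → Int :=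
    (PySem.List.pyRange 1 L 1).foldl
      (fun r d => (PySem.List.pyRange d L d).foldl
        (fun r' m => fun i => if i = d then r' d + freq m else r' i) r)
      (fun _ => 0)
  let pairs_ge : Int → Int := fun i => PySem.Int.floordiv (ral i * (ral i - 1)) 2
  let exact : Int → Int :=
    (PySem.List.pyRange (L - 1) 0 (-1)).foldl
      (fun e d =>
        let e1 : Int → Int := fun i => if i = d then pairs_ge d else e i
        (PySem.List.pyRange (2 * d) L d).foldl
          (fun e' m => fun i => if i = d then e' d - e' m else e' i) e1)
      (fun _ => 0)
  if L > 1 then exact 1 else 0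

theorem ABody_eq (V : List Int) (hpos : ∀ v ∈ V, 1 ≤ v) (L : Int) (hL3 : 3 ≤ L)
    (hbound : ∀ v ∈ V, v < L - 1) : ABody V L = PInt V 1 := by
  simp only [ABody]
  rw [freq_eq]
  have hstep : (fun (r : Int → Int) (d : Int) =>
      (PySem.List.pyRange d L d).foldl
        (fun r' m => fun i => if i = d then r' d + (fun i => (V.count i : Int)) m else r' i) r)
      = fun r d => fun i => if i = d then r d + Sfun V L d else r i := by
    funext r d
    rw [ral_inner_sum (fun i => (V.count i : Int)) d (PySem.List.pyRange d L d) r]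
    rfl
  rw [hstep]
  have hupd := upd_fold (fun d v => v + Sfun V L d) (PySem.List.pyRange 1 L 1)
    (PySem.List.nodup_pyRange_one 1 L) (fun _ => 0)
  beta_reduce at hupd
  rw [hupd]
  simp only [zero_add]
  rw [if_pos (by omega : (1:Int) < L)]
  have hback := back_loop L
    (fun d => PySem.Int.floordiv ((if d ∈ PySem.List.pyRange 1 L 1 then Sfun V L d else 0) *
      ((if d ∈ PySem.List.pyRange 1 L 1 then Sfun V L d else 0) - 1)) 2)
    (PInt V)
    (by
      intro d hd hdL
      beta_reduce
      rw [if_pos ((PySem.List.mem_pyRange_one).mpr ⟨hd, hdL⟩)]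
      exact key_identity V hpos L hbound d hd hdL)
    (L-1).toNat (L-1) rfl (by omega) (fun _ => 0)
    (by intro m h1 h2; exact absurd h2 (by omega))
    1 le_rfl (by omega)
  beta_reduce at hback
  exact hback

theorem vals_pos (arr : List Int) (k : Int)
    (hx : ∀ x ∈ arr, PySem.Int.mod x k = 0 → 1 ≤ PySem.Int.floordiv x k) :
    ∀ v ∈ (arr.filter (fun x => PySem.Int.mod x k == 0)).map (fun x => PySem.Int.floordiv x k), 1 ≤ v := by
  intro v hv
  simp only [List.mem_map, List.mem_filter] at hv
  obtain ⟨x, ⟨hxa, hxm⟩, rfl⟩ := hv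
  exact hx x hxa (by simpa using hxm)

theorem altEq (V : List Int) (hpos : ∀ v ∈ V, 1 ≤ v) : altGo 0 V = PInt V 1 := by
  rw [altGo_eq V 0]
  have h : pairsP (fun x y => pygcd x y == 1) V
      = pairsP (fun x y => ((Int.gcd x y : Int)) == 1) V :=
    pairsP_congr (fun x hx y hy => by
      rw [pygcd_eq y x (by linarith [hpos x hx]) (by linarith [hpos y hy])])
  rw [h]
  simp [PInt]

theorem main_eq (arr : List Int) (k : Int)
    (hx : ∀ x ∈ arr, PySem.Int.mod x k = 0 → 1 ≤ PySem.Int.floordiv x k) :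
    count_pairs_gcd_k arr k = count_pairs_gcd_k_alt arr k := by
  by_cases hnil : (arr.filter (fun x => PySem.Int.mod x k == 0)).map (fun x => PySem.Int.floordiv x k) = []
  · simp only [count_pairs_gcd_k, count_pairs_gcd_k_alt]
    rw [hnil]
    rfl
  · have hpos := vals_pos arr k hx
    have hkeys : (PySem.Dict.counter ((arr.filter (fun x => PySem.Int.mod x k == 0)).map (fun x => PySem.Int.floordiv x k))).keys ≠ [] := by
      rw [PySem.Dict.keys_counter]
      intro h
      obtain ⟨x, hxm⟩ := List.exists_mem_of_ne_nil _ hnil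
      have hmem := (PySem.Set.mem_ofList _ x).mpr hxm
      rw [h] at hmem
      exact absurd hmem (List.not_mem_nil)
    rcases hopt : PySem.List.max? (PySem.Dict.counter ((arr.filter (fun x => PySem.Int.mod x k == 0)).map (fun x => PySem.Int.floordiv x k))).keys (fun v => v) with _ | M
    · exact absurd ((PySem.List.max?_eq_none_iff _ _).mp hopt) hkeys
    · have hAr : count_pairs_gcd_k arr k
          = ABody ((arr.filter (fun x => PySem.Int.mod x k == 0)).map (fun x => PySem.Int.floordiv x k))
              (if (PySem.Dict.counter ((arr.filter (fun x => PySem.Int.mod x k == 0)).map (fun x => PySem.Int.floordiv x k))).keys ≠ [] then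
                (PySem.List.max? (PySem.Dict.counter ((arr.filter (fun x => PySem.Int.mod x k == 0)).map (fun x => PySem.Int.floordiv x k))).keys (fun v => v)).getD 0 + 2
               else 1) := rfl
      rw [hAr, if_pos hkeys, hopt]
      simp only [Option.getD_some]
      have hMmem : M ∈ (arr.filter (fun x => PySem.Int.mod x k == 0)).map (fun x => PySem.Int.floordiv x k) := by
        have := PySem.List.max?_mem hopt
        rwa [PySem.Dict.keys_counter, PySem.Set.mem_ofList] at this
      have hM1 : 1 ≤ M := hpos M hMmem
      have hbound : ∀ v ∈ (arr.filter (fun x => PySem.Int.mod x k == 0)).map (fun x => PySem.Int.floordiv x k), v < (M + 2) - 1 := by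
        intro v hv
        have hle := PySem.List.max?_isMax hopt v (by rwa [PySem.Dict.keys_counter, PySem.Set.mem_ofList])
        simp at hle
        omega
      rw [ABody_eq _ hpos (M + 2) (by omega) hbound]
      rw [show count_pairs_gcd_k_alt arr k
          = altGo 0 ((arr.filter (fun x => PySem.Int.mod x k == 0)).map (fun x => PySem.Int.floordiv x k)) from rfl,
        altEq _ hpos]

-- ===== VERDICT (by name: the statement is the Claim_ definition above) =====
theorem count_pairs_gcd_k_spec : Claim_equal_count_pairs_gcd_k := by
  intro arr k _ hpre
  exact main_eq arr k hpre.2
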